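-- pv_equiv track=rewrite | github.com/clawdiard/clawler | clawler/sources/youtube.py | _channel_category
-- ===== SOURCE A (Python) =====
-- def _channel_category(name: str) -> str:
--     """Map channel names to categories."""
--     mapping = {
--         "tech": {"Fireship", "freeCodeCamp", "Traversy Media", "Android Developers", "Google Chrome Developers", "Computerphile"},
--         "ai": {"AI Explained", "Two Minute Papers", "Bycloud", "Siraj Raval", "sentdex"},
--         "science": {"Vsauce", "Veritasium", "minutephysics", "PBS Space Time", "SciShow"},
--         "business": {"How Money Works", "Graham Stephan", "Patrick Boyle", "Jordan Harbinger"},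
--         "design": {"The Futur", "Elizabeth Filips"},
--         "gaming": {"Game Maker's Toolkit"},
--         "sports": {"Braille Skateboarding", "The Berrics"},
--         "world": {"CNN", "Johnny Harris", "TLDR News Global"},
--     }
--     for cat, names in mapping.items():
--         if name in names:
--             return cat
--     return "general"
-- ===== SOURCE B (Python) =====
-- _CATEGORY_BY_CHANNEL = {
--     "Fireship": "tech", "freeCodeCamp": "tech", "Traversy Media": "tech",
--     "Android Developers": "tech", "Google Chrome Developers": "tech", "Computerphile": "tech",
--     "AI Explained": "ai", "Two Minute Papers": "ai", "Bycloud": "ai",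
--     "Siraj Raval": "ai", "sentdex": "ai",
--     "Vsauce": "science", "Veritasium": "science", "minutephysics": "science",
--     "PBS Space Time": "science", "SciShow": "science",
--     "How Money Works": "business", "Graham Stephan": "business",
--     "Patrick Boyle": "business", "Jordan Harbinger": "business",
--     "The Futur": "design", "Elizabeth Filips": "design",
--     "Game Maker's Toolkit": "gaming",
--     "Braille Skateboarding": "sports", "The Berrics": "sports",
--     "CNN": "world", "Johnny Harris": "world", "TLDR News Global": "world",
-- }
--
--
-- def _channel_category(name: str) -> str:
--     """Map channel names to categories."""
--     return _CATEGORY_BY_CHANNEL.get(name, "general")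
-- ===== Notes on version B (the rewrite author's own statement) =====
-- stated objective: simpler
-- what changed: Replaces the loop over eight category sets with one flat name-to-category dictionary built once at module level and a single .get lookup whose default is the same fallback category A returns for unknown names.
import Mathlib
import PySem

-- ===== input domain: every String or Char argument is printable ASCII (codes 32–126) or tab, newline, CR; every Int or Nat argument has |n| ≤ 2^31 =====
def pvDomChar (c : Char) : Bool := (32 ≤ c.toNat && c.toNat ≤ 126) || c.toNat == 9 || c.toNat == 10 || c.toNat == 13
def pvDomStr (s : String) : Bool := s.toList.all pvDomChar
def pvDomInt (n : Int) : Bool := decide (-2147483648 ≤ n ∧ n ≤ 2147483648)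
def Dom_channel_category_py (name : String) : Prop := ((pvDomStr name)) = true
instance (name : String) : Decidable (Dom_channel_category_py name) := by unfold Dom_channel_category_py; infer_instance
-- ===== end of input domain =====

-- B replaces A's loop over eight category sets with a single flat name→category dict lookup (simpler).

-- ===== PORT A =====
-- the 'for cat, names in mapping.items(): if name in names: return cat' loop
def chanLoop (name : String) : List (String × PySem.Set String) → String
  | [] => "general"
  | (cat, names) :: rest => if PySem.Set.contains names name then cat else chanLoop name rest

def channel_category_py (name : String) : String :=
  chanLoop name [
    ("tech", PySem.Set.ofList ["Fireship", "freeCodeCamp", "Traversy Media", "Android Developers", "Google Chrome Developers", "Computerphile"]),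
    ("ai", PySem.Set.ofList ["AI Explained", "Two Minute Papers", "Bycloud", "Siraj Raval", "sentdex"]),
    ("science", PySem.Set.ofList ["Vsauce", "Veritasium", "minutephysics", "PBS Space Time", "SciShow"]),
    ("business", PySem.Set.ofList ["How Money Works", "Graham Stephan", "Patrick Boyle", "Jordan Harbinger"]),
    ("design", PySem.Set.ofList ["The Futur", "Elizabeth Filips"]),
    ("gaming", PySem.Set.ofList ["Game Maker's Toolkit"]),
    ("sports", PySem.Set.ofList ["Braille Skateboarding", "The Berrics"]),
    ("world", PySem.Set.ofList ["CNN", "Johnny Harris", "TLDR News Global"])]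

-- ===== PORT B =====
def pvCategoryByChannel : PySem.Dict String String := PySem.Dict.ofList [
    ("Fireship", "tech"),
    ("freeCodeCamp", "tech"),
    ("Traversy Media", "tech"),
    ("Android Developers", "tech"),
    ("Google Chrome Developers", "tech"),
    ("Computerphile", "tech"),
    ("AI Explained", "ai"),
    ("Two Minute Papers", "ai"),
    ("Bycloud", "ai"),
    ("Siraj Raval", "ai"),
    ("sentdex", "ai"),
    ("Vsauce", "science"),
    ("Veritasium", "science"),
    ("minutephysics", "science"),
    ("PBS Space Time", "science"),
    ("SciShow", "science"),
    ("How Money Works", "business"),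
    ("Graham Stephan", "business"),
    ("Patrick Boyle", "business"),
    ("Jordan Harbinger", "business"),
    ("The Futur", "design"),
    ("Elizabeth Filips", "design"),
    ("Game Maker's Toolkit", "gaming"),
    ("Braille Skateboarding", "sports"),
    ("The Berrics", "sports"),
    ("CNN", "world"),
    ("Johnny Harris", "world"),
    ("TLDR News Global", "world")]

def channel_category_py_alt (name : String) : String :=
  PySem.Dict.getD pvCategoryByChannel name "general"

-- ===== PRECONDITION & SPEC =====
def Spec_channel_category_py (name : String) (out : String) : Prop := out = channel_category_py_alt name
instance (name : String) (out : String) : Decidable (Spec_channel_category_py name out) := by unfold Spec_channel_category_py; infer_instance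

-- ===== CLAIM (what is proved, stated in full; the proofs are below) =====
def Claim_equal_channel_category_py : Prop := ∀ (name : String), Dom_channel_category_py name → Spec_channel_category_py name (channel_category_py name)

-- ===== LEMMAS AND PROOFS =====
theorem pvCategoryByChannelItems : pvCategoryByChannel.items =
    [("Fireship", "tech"), ("freeCodeCamp", "tech"), ("Traversy Media", "tech"),
     ("Android Developers", "tech"), ("Google Chrome Developers", "tech"), ("Computerphile", "tech"),
     ("AI Explained", "ai"), ("Two Minute Papers", "ai"), ("Bycloud", "ai"), ("Siraj Raval", "ai"),
     ("sentdex", "ai"), ("Vsauce", "science"), ("Veritasium", "science"), ("minutephysics", "science"),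
     ("PBS Space Time", "science"), ("SciShow", "science"), ("How Money Works", "business"),
     ("Graham Stephan", "business"), ("Patrick Boyle", "business"), ("Jordan Harbinger", "business"),
     ("The Futur", "design"), ("Elizabeth Filips", "design"), ("Game Maker's Toolkit", "gaming"),
     ("Braille Skateboarding", "sports"), ("The Berrics", "sports"), ("CNN", "world"),
     ("Johnny Harris", "world"), ("TLDR News Global", "world")] := by decide

-- ===== VERDICT (by name: the statement is the Claim_ definition above) =====
theorem channel_category_py_spec : Claim_equal_channel_category_py := by
  intro name _
  show channel_category_py name = channel_category_py_alt name
  by_cases h1 : name = "Fireship"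
  · subst h1; decide
  by_cases h2 : name = "freeCodeCamp"
  · subst h2; decide
  by_cases h3 : name = "Traversy Media"
  · subst h3; decide
  by_cases h4 : name = "Android Developers"
  · subst h4; decide
  by_cases h5 : name = "Google Chrome Developers"
  · subst h5; decide
  by_cases h6 : name = "Computerphile"
  · subst h6; decide
  by_cases h7 : name = "AI Explained"
  · subst h7; decide
  by_cases h8 : name = "Two Minute Papers"
  · subst h8; decide
  by_cases h9 : name = "Bycloud"
  · subst h9; decide
  by_cases h10 : name = "Siraj Raval"
  · subst h10; decide
  by_cases h11 : name = "sentdex"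
  · subst h11; decide
  by_cases h12 : name = "Vsauce"
  · subst h12; decide
  by_cases h13 : name = "Veritasium"
  · subst h13; decide
  by_cases h14 : name = "minutephysics"
  · subst h14; decide
  by_cases h15 : name = "PBS Space Time"
  · subst h15; decide
  by_cases h16 : name = "SciShow"
  · subst h16; decide
  by_cases h17 : name = "How Money Works"
  · subst h17; decide
  by_cases h18 : name = "Graham Stephan"
  · subst h18; decide
  by_cases h19 : name = "Patrick Boyle"
  · subst h19; decide
  by_cases h20 : name = "Jordan Harbinger"
  · subst h20; decide
  by_cases h21 : name = "The Futur"
  · subst h21; decide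
  by_cases h22 : name = "Elizabeth Filips"
  · subst h22; decide
  by_cases h23 : name = "Game Maker's Toolkit"
  · subst h23; decide
  by_cases h24 : name = "Braille Skateboarding"
  · subst h24; decide
  by_cases h25 : name = "The Berrics"
  · subst h25; decide
  by_cases h26 : name = "CNN"
  · subst h26; decide
  by_cases h27 : name = "Johnny Harris"
  · subst h27; decide
  by_cases h28 : name = "TLDR News Global"
  · subst h28; decide
  -- name is none of the 28 known channels: both sides return "general"
  simp [channel_category_py, channel_category_py_alt, chanLoop, pvCategoryByChannelItems,
    PySem.Set.contains, PySem.Dict.getD, PySem.Dict.get?, List.find?,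
    h1, h2, h3, h4, h5, h6, h7, h8, h9, h10, h11, h12, h13, h14, h15, h16, h17, h18, h19, h20,
    h21, h22, h23, h24, h25, h26, h27, h28,
    beq_eq_false_iff_ne.mpr (Ne.symm h1),
    beq_eq_false_iff_ne.mpr (Ne.symm h2),
    beq_eq_false_iff_ne.mpr (Ne.symm h3),
    beq_eq_false_iff_ne.mpr (Ne.symm h4),
    beq_eq_false_iff_ne.mpr (Ne.symm h5),
    beq_eq_false_iff_ne.mpr (Ne.symm h6),
    beq_eq_false_iff_ne.mpr (Ne.symm h7),
    beq_eq_false_iff_ne.mpr (Ne.symm h8),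
    beq_eq_false_iff_ne.mpr (Ne.symm h9),
    beq_eq_false_iff_ne.mpr (Ne.symm h10),
    beq_eq_false_iff_ne.mpr (Ne.symm h11),
    beq_eq_false_iff_ne.mpr (Ne.symm h12),
    beq_eq_false_iff_ne.mpr (Ne.symm h13),
    beq_eq_false_iff_ne.mpr (Ne.symm h14),
    beq_eq_false_iff_ne.mpr (Ne.symm h15),
    beq_eq_false_iff_ne.mpr (Ne.symm h16),
    beq_eq_false_iff_ne.mpr (Ne.symm h17),
    beq_eq_false_iff_ne.mpr (Ne.symm h18),
    beq_eq_false_iff_ne.mpr (Ne.symm h19),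
    beq_eq_false_iff_ne.mpr (Ne.symm h20),
    beq_eq_false_iff_ne.mpr (Ne.symm h21),
    beq_eq_false_iff_ne.mpr (Ne.symm h22),
    beq_eq_false_iff_ne.mpr (Ne.symm h23),
    beq_eq_false_iff_ne.mpr (Ne.symm h24),
    beq_eq_false_iff_ne.mpr (Ne.symm h25),
    beq_eq_false_iff_ne.mpr (Ne.symm h26),
    beq_eq_false_iff_ne.mpr (Ne.symm h27),
    beq_eq_false_iff_ne.mpr (Ne.symm h28)]
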